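-- pv_equiv track=rewrite | github.com/nalua72/roadmap-retos-programacion | Roadmap/35 - REPARTIENDO LOS ANILLOS DE PODER/python/nalua72.py | find_distributions
-- ===== SOURCE A (Python) =====
-- def is_prime(n: int) -> bool:
--     """
--     Returns if a number is prime
--
--     :param n: Description
--     :type n: int
--     :return: Description
--     :rtype: bool
--     """
--     if n < 2:
--         return False
--     if n == 2:
--         return True
--     if n % 2 == 0:
--         return False
--
--     for i in range(3, int(n ** 0.5) + 1, 2):
--         if n % i == 0:
--             return False
--     return True
--
-- def find_distributions(total_rings: int) -> list[tuple[int, int, int]]: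
--     """
--     Returns valid distributions as tuples:
--     (men, elves, dwarves)
--     """
--     valid_distributions = []
--
--     for men in range(2, total_rings + 1, 2):  # pares
--         for elves in range(1, total_rings + 1, 2):  # impares
--             dwarves = total_rings - men - elves
--             if dwarves > 0 and is_prime(dwarves):
--                 valid_distributions.append((men, elves, dwarves))
--
--     return valid_distributions
-- ===== SOURCE B (Python) =====
-- def is_prime(n: int) -> bool:
--     if n < 2:
--         return False
--     if n == 2:
--         return True
--     if n % 2 == 0:
--         return False
--     for i in range(3, int(n ** 0.5) + 1, 2):
--         if n % i == 0:
--             return False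
--     return True
--
--
-- def find_distributions(total_rings: int) -> list[tuple[int, int, int]]:
--     # Staged: build the prime table once, enumerate (prime, odd-elves) pairs
--     # computing men by subtraction, then sort at the end.  (men, elves)
--     # determines dwarves, so sorting by that key reproduces A's order.
--     primes = [p for p in range(2, total_rings) if is_prime(p)]
--     triples = [(total_rings - elves - p, elves, p)
--                for p in primes
--                for elves in range(1, total_rings - p, 2)
--                if (total_rings - elves - p) % 2 == 0 and (total_rings - elves - p) >= 2]
--     triples.sort(key=lambda t: (t[0], t[1]))
--     return triples
-- ===== Notes on version B (the rewrite author's own statement) =====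
-- stated objective: alternative
-- what changed: B builds the prime table once, enumerates (prime, odd elves) pairs computing men by subtraction (a comprehension over a different index set, with no primality test in the inner loop), and sorts the collected triples by (men, elves) at the end instead of generating them in order with nested even-men/odd-elves scans.
import Mathlib
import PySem

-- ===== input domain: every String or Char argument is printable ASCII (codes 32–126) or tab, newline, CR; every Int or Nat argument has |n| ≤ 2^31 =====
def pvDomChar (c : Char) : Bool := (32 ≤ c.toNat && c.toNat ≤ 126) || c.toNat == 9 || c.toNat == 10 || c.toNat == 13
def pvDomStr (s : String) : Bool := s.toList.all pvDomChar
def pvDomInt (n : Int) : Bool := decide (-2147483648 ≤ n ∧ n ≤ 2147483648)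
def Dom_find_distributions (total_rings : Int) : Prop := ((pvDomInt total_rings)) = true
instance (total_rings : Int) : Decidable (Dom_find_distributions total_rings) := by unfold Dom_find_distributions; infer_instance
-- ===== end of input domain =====

-- B stages the work differently: prime table first, then a comprehension over (prime, odd elves)
-- pairs computing men by subtraction, then a final sort by (men, elves); same output as A.

-- ===== PORT A =====
-- is_prime: int(n ** 0.5) is ported as Nat.sqrt, exact for the |n| ≤ 2^31 domain
-- (the double sqrt of such ints is correctly rounded, so int(n**0.5) = isqrt(n)).
def isPrime (n : Int) : Bool :=
  if n < 2 then false
  else if n = 2 then true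
  else if PySem.Int.mod n 2 = 0 then false
  else if (PySem.List.pyRange 3 ((n.toNat.sqrt : Int) + 1) 2).any
            (fun i => PySem.Int.mod n i = 0) then false
  else true

def find_distributions (total_rings : Int) : List (Int × Int × Int) :=
  (PySem.List.pyRange 2 (total_rings + 1) 2).foldl (fun acc men =>
    (PySem.List.pyRange 1 (total_rings + 1) 2).foldl (fun acc2 elves =>
      let dwarves := total_rings - men - elves
      if dwarves > 0 ∧ isPrime dwarves = true then acc2 ++ [(men, elves, dwarves)] else acc2)
      acc) []

-- ===== PORT B =====
-- Source B's is_prime is textually the same helper as A's, so the port shares isPrime.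
-- The comprehension is filter+map under flatMap; triples.sort(key=λt.(t[0],t[1])) is sorted2.
def find_distributions_alt (total_rings : Int) : List (Int × Int × Int) :=
  let primes := (PySem.List.pyRange 2 total_rings 1).filter (fun p => isPrime p)
  let triples := primes.flatMap (fun p =>
    ((PySem.List.pyRange 1 (total_rings - p) 2).filter
        (fun elves => decide (PySem.Int.mod (total_rings - elves - p) 2 = 0 ∧
                              total_rings - elves - p ≥ 2))).map
      (fun elves => (total_rings - elves - p, elves, p)))
  PySem.List.sorted2 triples (fun t => t.1) (fun t => t.2.1)

-- ===== PRECONDITION & SPEC =====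
def Spec_find_distributions (total_rings : Int) (out : List (Int × Int × Int)) : Prop := out = find_distributions_alt total_rings
instance (total_rings : Int) (out : List (Int × Int × Int)) : Decidable (Spec_find_distributions total_rings out) := by unfold Spec_find_distributions; infer_instance

-- ===== CLAIM (what is proved, stated in full; the proofs are below) =====
def Claim_equal_find_distributions : Prop := ∀ (total_rings : Int), Dom_find_distributions total_rings → Spec_find_distributions total_rings (find_distributions total_rings)

-- ===== LEMMAS AND PROOFS =====

theorem isPrime_two_le {n : Int} (h : isPrime n = true) : 2 ≤ n := by
  by_contra hn
  simp [isPrime, show n < 2 by omega] at h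

theorem pairwise_lt_pyRange_two (a b : Int) : (PySem.List.pyRange a b 2).Pairwise (· < ·) := by
  rw [PySem.List.pyRange_of_pos a b (by norm_num)]
  refine List.pairwise_map.2 ?_
  exact (List.pairwise_lt_range).imp (by intro x y h; omega)

-- A's program as a flatMap of per-men blocks
theorem A_flat (t : Int) : find_distributions t =
    (PySem.List.pyRange 2 (t + 1) 2).flatMap (fun men =>
      ((PySem.List.pyRange 1 (t + 1) 2).filter
          (fun e => decide (t - men - e > 0 ∧ isPrime (t - men - e) = true))).map
        (fun e => (men, e, t - men - e))) := by
  unfold find_distributions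
  have hstep : (fun (acc : List (Int × Int × Int)) (men : Int) =>
      (PySem.List.pyRange 1 (t + 1) 2).foldl (fun acc2 elves =>
        let dwarves := t - men - elves
        if dwarves > 0 ∧ isPrime dwarves = true then acc2 ++ [(men, elves, dwarves)] else acc2) acc)
      = (fun acc men => acc ++ ((PySem.List.pyRange 1 (t + 1) 2).filter
          (fun e => decide (t - men - e > 0 ∧ isPrime (t - men - e) = true))).map
        (fun e => (men, e, t - men - e))) := by
    funext acc men
    exact PySem.List.foldl_append_ite
      (fun e => t - men - e > 0 ∧ isPrime (t - men - e) = true)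
      (fun e => (men, e, t - men - e)) _ acc
  rw [hstep, PySem.List.foldl_append_eq_flatMap, List.nil_append]

-- the list Source B sorts, before sorting
def triplesOf (t : Int) : List (Int × Int × Int) :=
  ((PySem.List.pyRange 2 t 1).filter (fun p => isPrime p)).flatMap (fun p =>
    ((PySem.List.pyRange 1 (t - p) 2).filter
        (fun elves => decide (PySem.Int.mod (t - elves - p) 2 = 0 ∧ t - elves - p ≥ 2))).map
      (fun elves => (t - elves - p, elves, p)))

-- Python's sorted(xs, key=λt.(t[0],t[1])) is sorting by the lexicographic product key
theorem sorted2_eq_sorted_lex (xs : List (Int × Int × Int)) :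
    PySem.List.sorted2 xs (fun t => t.1) (fun t => t.2.1)
      = PySem.List.sorted xs (fun t => toLex (t.1, t.2.1)) := by
  rw [PySem.List.sorted_eq_foldl_insertBy]
  unfold PySem.List.sorted2
  show List.foldl (fun acc x => PySem.List.insertBy (fun a b =>
      decide (a.1 < b.1) || (!decide (b.1 < a.1) && decide (a.2.1 < b.2.1))) x acc) [] xs = _
  congr 1
  funext acc x
  congr 1
  funext a b
  have h : (toLex (a.1, a.2.1) < toLex (b.1, b.2.1)) ↔
      (a.1 < b.1 ∨ a.1 = b.1 ∧ a.2.1 < b.2.1) := Prod.Lex.lt_iff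
  by_cases h1 : a.1 < b.1 <;> by_cases h2 : b.1 < a.1 <;> by_cases h3 : a.2.1 < b.2.1 <;>
    simp [h, h1, h2, h3] <;> omega

-- the sorted order on triples, as a plain relation
theorem A_flat_pairwise (t : Int) :
    ((PySem.List.pyRange 2 (t + 1) 2).flatMap (fun men =>
      ((PySem.List.pyRange 1 (t + 1) 2).filter
          (fun e => decide (t - men - e > 0 ∧ isPrime (t - men - e) = true))).map
        (fun e => (men, e, t - men - e)))).Pairwise
      (fun x y => x.1 < y.1 ∨ x.1 = y.1 ∧ x.2.1 < y.2.1) := by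
  rw [List.pairwise_flatMap]
  constructor
  · intro men _
    refine List.pairwise_map.2 ?_
    refine ((pairwise_lt_pyRange_two 1 (t+1)).sublist List.filter_sublist).imp ?_
    intro e1 e2 h
    right
    exact ⟨rfl, h⟩
  · refine (pairwise_lt_pyRange_two 2 (t+1)).imp ?_
    intro m1 m2 hm x hx y hy
    rcases List.mem_map.1 hx with ⟨e1, _, rfl⟩
    rcases List.mem_map.1 hy with ⟨e2, _, rfl⟩
    left; exact hm

theorem triples_pairwise (t : Int) :
    (triplesOf t).Pairwise (fun x y => x.2.2 < y.2.2 ∨ x.2.2 = y.2.2 ∧ x.2.1 < y.2.1) := by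
  unfold triplesOf
  rw [List.pairwise_flatMap]
  constructor
  · intro p _
    refine List.pairwise_map.2 ?_
    refine ((pairwise_lt_pyRange_two 1 (t - p)).sublist List.filter_sublist).imp ?_
    intro e1 e2 h
    right
    exact ⟨rfl, h⟩
  · refine ((PySem.List.pairwise_lt_pyRange_one 2 t).sublist List.filter_sublist).imp ?_
    intro p1 p2 hp x hx y hy
    rcases List.mem_map.1 hx with ⟨e1, _, rfl⟩
    rcases List.mem_map.1 hy with ⟨e2, _, rfl⟩
    left; exact hp

-- membership in the odd range range(a, b, 2)
theorem mem_step2 (a b x : Int) : x ∈ PySem.List.pyRange a b 2 ↔ a ≤ x ∧ x < b ∧ 2 ∣ x - a :=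
  PySem.List.mem_pyRange_iff_of_pos (by norm_num) x

-- the two programs collect the same set of triples
theorem mem_A_iff_mem_triples (t : Int) (x : Int × Int × Int) :
    x ∈ ((PySem.List.pyRange 2 (t + 1) 2).flatMap (fun men =>
      ((PySem.List.pyRange 1 (t + 1) 2).filter
          (fun e => decide (t - men - e > 0 ∧ isPrime (t - men - e) = true))).map
        (fun e => (men, e, t - men - e))))
    ↔ x ∈ triplesOf t := by
  unfold triplesOf
  simp only [List.mem_flatMap, List.mem_map, List.mem_filter, decide_eq_true_eq]
  constructor
  · rintro ⟨men, hmen, e, ⟨he, hd, hp⟩, rfl⟩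
    rw [mem_step2] at hmen he
    have h2d : 2 ≤ t - men - e := isPrime_two_le hp
    refine ⟨t - men - e, ⟨?_, hp⟩, e, ⟨?_, ?_, ?_⟩, ?_⟩
    · rw [PySem.List.mem_pyRange_one]; omega
    · rw [mem_step2]; exact ⟨he.1, by omega, he.2.2⟩
    · rw [show t - e - (t - men - e) = men by omega, PySem.Int.mod_eq_zero_iff_dvd]
      rcases hmen.2.2 with ⟨k, hk⟩; exact ⟨k + 1, by omega⟩
    · omega
    · simp only [show t - e - (t - men - e) = men by omega]
  · rintro ⟨p, ⟨hpm, hp⟩, e, ⟨he, hmod, hm2⟩, rfl⟩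
    rw [PySem.List.mem_pyRange_one] at hpm
    rw [mem_step2] at he
    rw [PySem.Int.mod_eq_zero_iff_dvd] at hmod
    refine ⟨t - e - p, ?_, e, ⟨?_, ?_, ?_⟩, ?_⟩
    · rw [mem_step2]
      rcases hmod with ⟨k, hk⟩
      exact ⟨by omega, by omega, ⟨k - 1, by omega⟩⟩
    · rw [mem_step2]; exact ⟨he.1, by omega, he.2.2⟩
    · omega
    · rw [show t - (t - e - p) - e = p by omega]; exact hp
    · simp only [show t - (t - e - p) - e = p by omega]

theorem A_flat_nodup (t : Int) :
    ((PySem.List.pyRange 2 (t + 1) 2).flatMap (fun men =>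
      ((PySem.List.pyRange 1 (t + 1) 2).filter
          (fun e => decide (t - men - e > 0 ∧ isPrime (t - men - e) = true))).map
        (fun e => (men, e, t - men - e)))).Nodup := by
  refine (A_flat_pairwise t).imp ?_
  intro x y h hxy
  subst hxy
  omega

theorem triples_nodup (t : Int) : (triplesOf t).Nodup := by
  refine (triples_pairwise t).imp ?_
  intro x y h hxy
  subst hxy
  omega

-- ===== VERDICT (by name: the statement is the Claim_ definition above) =====
theorem find_distributions_spec : Claim_equal_find_distributions := by
  intro t _
  unfold Spec_find_distributions
  show find_distributions t =
    PySem.List.sorted2 (triplesOf t) (fun x => x.1) (fun x => x.2.1)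
  rw [sorted2_eq_sorted_lex, A_flat]
  refine (PySem.List.sorted_eq_of_perm_of_pairwise_lt _ _ _ ?_ ?_).symm
  · exact (List.perm_ext_iff_of_nodup (A_flat_nodup t) (triples_nodup t)).2
      (mem_A_iff_mem_triples t)
  · refine (A_flat_pairwise t).imp ?_
    intro x y h
    exact Prod.Lex.lt_iff.2 h
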